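-- pv_equiv track=rewrite | github.com/jtsteinbach/cthulhu | src/cli.py | _extract_identity_from_records
-- ===== SOURCE A (Python) =====
-- from typing import Any, Deque, Dict, List, Optional
--
-- def _extract_identity_from_records(event: Dict[str, Any]) -> Dict[str, Any]:
--     """
--     Pull human-friendly user/group names from auditd records if present.
--     e.g., UID="root", AUID="root", GID="root", etc.
--     """
--     result: Dict[str, Any] = {
--         "uid_name": None,
--         "euid_name": None,
--         "auid_name": None,
--         "gid_name": None,
--         "egid_name": None,
--     }
--
--     for rec in event.get("records", []):
--         fields = rec.get("fields", {}) or {}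
--         if result["uid_name"] is None and "UID" in fields:
--             result["uid_name"] = fields["UID"]
--         if result["euid_name"] is None and "EUID" in fields:
--             result["euid_name"] = fields["EUID"]
--         if result["auid_name"] is None and "AUID" in fields:
--             result["auid_name"] = fields["AUID"]
--         if result["gid_name"] is None and "GID" in fields:
--             result["gid_name"] = fields["GID"]
--         if result["egid_name"] is None and "EGID" in fields:
--             result["egid_name"] = fields["EGID"]
--
--     return result
-- ===== SOURCE B (Python) =====
-- from typing import Any, Dict
--
-- _ID_FIELDS = (
--     ("uid_name", "UID"),
--     ("euid_name", "EUID"),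
--     ("auid_name", "AUID"),
--     ("gid_name", "GID"),
--     ("egid_name", "EGID"),
-- )
--
-- def _extract_identity_from_records(event: Dict[str, Any]) -> Dict[str, Any]:
--     records = event.get("records", [])
--     return {
--         key: next(
--             (v for rec in records
--              if (v := (rec.get("fields") or {}).get(name)) is not None),
--             None,
--         )
--         for key, name in _ID_FIELDS
--     }
-- ===== Notes on version B (the rewrite author's own statement) =====
-- stated objective: idiomatic
-- what changed: Record-major single pass with five is-None latching guards replaced by a field-name table and a field-major first-match scan (next over a generator) per key, built as a dict comprehension.
import Mathlib
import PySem

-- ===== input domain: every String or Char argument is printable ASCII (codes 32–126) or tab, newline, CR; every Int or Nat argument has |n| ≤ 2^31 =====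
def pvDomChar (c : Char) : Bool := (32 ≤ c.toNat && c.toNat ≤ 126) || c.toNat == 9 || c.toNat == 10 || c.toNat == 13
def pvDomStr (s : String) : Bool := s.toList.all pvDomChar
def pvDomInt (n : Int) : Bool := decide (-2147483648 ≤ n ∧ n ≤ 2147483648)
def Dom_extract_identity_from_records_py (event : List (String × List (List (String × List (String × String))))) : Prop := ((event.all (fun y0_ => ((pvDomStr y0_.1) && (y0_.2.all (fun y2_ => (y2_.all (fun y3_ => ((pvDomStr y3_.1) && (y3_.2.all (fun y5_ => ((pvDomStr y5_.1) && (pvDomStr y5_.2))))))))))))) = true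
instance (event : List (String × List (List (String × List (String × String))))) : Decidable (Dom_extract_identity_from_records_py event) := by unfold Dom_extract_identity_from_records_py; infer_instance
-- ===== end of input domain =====

-- B replaces A's record-major pass with five latching guards by a field-name table
-- and a field-major first-match scan per key (idiomatic; same complexity).

-- ===== PORT A =====
-- 'if result[k] is None and NAME in fields: result[k] = fields[NAME]'
def pvUpd (c : Option String) (g : Option String) : Option String :=
  if c.isNone && g.isSome then g else c

-- loop body of A: one record updates the five result slots in order
def pvAStep
    (st : Option String × Option String × Option String × Option String × Option String)
    (rec : List (String × List (String × String))) :
    Option String × Option String × Option String × Option String × Option String :=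
  let fields := PySem.Dict.getD (PySem.Dict.mk rec) "fields" []   -- rec.get("fields", {}) or {} ([] is already falsy-normal)
  (pvUpd st.1 (PySem.Dict.get? (PySem.Dict.mk fields) "UID"),
   pvUpd st.2.1 (PySem.Dict.get? (PySem.Dict.mk fields) "EUID"),
   pvUpd st.2.2.1 (PySem.Dict.get? (PySem.Dict.mk fields) "AUID"),
   pvUpd st.2.2.2.1 (PySem.Dict.get? (PySem.Dict.mk fields) "GID"),
   pvUpd st.2.2.2.2 (PySem.Dict.get? (PySem.Dict.mk fields) "EGID"))

def extract_identity_from_records_py (event : List (String × List (List (String × List (String × String))))) : List (String × Option String) :=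
  let st := (PySem.Dict.getD (PySem.Dict.mk event) "records" []).foldl pvAStep (none, none, none, none, none)
  [("uid_name", st.1), ("euid_name", st.2.1), ("auid_name", st.2.2.1),
   ("gid_name", st.2.2.2.1), ("egid_name", st.2.2.2.2)]

-- ===== PORT B =====
-- next((v for rec in records if (v := (rec.get("fields") or {}).get(name)) is not None), None)
def pvFirstField (recs : List (List (String × List (String × String)))) (name : String) : Option String :=
  match recs with
  | [] => none
  | rec :: rest =>
    match PySem.Dict.get? (PySem.Dict.mk (PySem.Dict.getD (PySem.Dict.mk rec) "fields" [])) name with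
    | some v => some v
    | none => pvFirstField rest name

def pvIdTable : List (String × String) :=
  [("uid_name", "UID"), ("euid_name", "EUID"), ("auid_name", "AUID"),
   ("gid_name", "GID"), ("egid_name", "EGID")]

def extract_identity_from_records_py_alt (event : List (String × List (List (String × List (String × String))))) : List (String × Option String) :=
  let records := PySem.Dict.getD (PySem.Dict.mk event) "records" []
  pvIdTable.map (fun p => (p.1, pvFirstField records p.2))

-- ===== PRECONDITION & SPEC =====
def Spec_extract_identity_from_records_py (event : List (String × List (List (String × List (String × String))))) (out : List (String × Option String)) : Prop := out = extract_identity_from_records_py_alt event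
instance (event : List (String × List (List (String × List (String × String))))) (out : List (String × Option String)) : Decidable (Spec_extract_identity_from_records_py event out) := by unfold Spec_extract_identity_from_records_py; infer_instance

-- ===== CLAIM (what is proved, stated in full; the proofs are below) =====
def Claim_equal_extract_identity_from_records_py : Prop := ∀ (event : List (String × List (List (String × List (String × String))))), Dom_extract_identity_from_records_py event → Spec_extract_identity_from_records_py event (extract_identity_from_records_py event)

-- ===== LEMMAS AND PROOFS =====

theorem pvUpd_eq_or (c g : Option String) : pvUpd c g = c.or g := by
  cases c <;> cases g <;> rfl

theorem pvFirstField_cons (r : List (String × List (String × String)))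
    (rs : List (List (String × List (String × String)))) (n : String) :
    pvFirstField (r :: rs) n =
      (PySem.Dict.get? (PySem.Dict.mk (PySem.Dict.getD (PySem.Dict.mk r) "fields" [])) n).or
        (pvFirstField rs n) := by
  cases h : PySem.Dict.get? (PySem.Dict.mk (PySem.Dict.getD (PySem.Dict.mk r) "fields" [])) n <;>
    simp [pvFirstField, h]

theorem pvLoop_eq (recs : List (List (String × List (String × String))))
    (a b c d e : Option String) :
    recs.foldl pvAStep (a, b, c, d, e) =
      (a.or (pvFirstField recs "UID"),
       b.or (pvFirstField recs "EUID"),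
       c.or (pvFirstField recs "AUID"),
       d.or (pvFirstField recs "GID"),
       e.or (pvFirstField recs "EGID")) := by
  induction recs generalizing a b c d e with
  | nil => simp [pvFirstField]
  | cons r rs ih =>
    simp only [List.foldl_cons, pvAStep, pvUpd_eq_or, ih, pvFirstField_cons, Option.or_assoc]

-- ===== VERDICT (by name: the statement is the Claim_ definition above) =====
theorem extract_identity_from_records_py_spec : Claim_equal_extract_identity_from_records_py := by
  intro event _
  unfold Spec_extract_identity_from_records_py
  simp [extract_identity_from_records_py, extract_identity_from_records_py_alt, pvIdTable, pvLoop_eq]
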